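-- pv_equiv track=rewrite | github.com/bastelbude1/aiohue | scripts/export-ha-hue-inventory.py | group_entities_by_type
-- ===== SOURCE A (Python) =====
-- from typing import Dict, List, Optional, Any
--
-- def group_entities_by_type(entities: List[Dict]) -> Dict[str, List[Dict]]:
--     """
--     Group entities by platform type.
--
--     Args:
--         entities: List of entity dicts
--
--     Returns:
--         Dict with entity_type as key, list of entities as value
--     """
--     grouped = {}
--
--     for entity in entities:
--         entity_id = entity.get("entity_id", "")
--
--         # Extract type from entity_id (light.xxx, sensor.xxx, etc.)
--         entity_type = entity_id.split(".")[0] if "." in entity_id else "unknown"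
--
--         if entity_type not in grouped:
--             grouped[entity_type] = []
--
--         grouped[entity_type].append(entity)
--
--     return grouped
-- ===== SOURCE B (Python) =====
-- def group_entities_by_type(entities):
--     """Group entities by platform type: collect distinct type keys in first-seen
--     order, then build each group with one filter pass per key."""
--     def key(entity):
--         entity_id = entity.get("entity_id", "")
--         return entity_id.split(".")[0] if "." in entity_id else "unknown"
--
--     keys = list(dict.fromkeys(key(e) for e in entities))
--     return {k: [e for e in entities if key(e) == k] for k in keys}
-- ===== Notes on version B (the rewrite author's own statement) =====
-- stated objective: alternative
-- what changed: A builds the groups incrementally in one pass over a dict of lists; B first dedups the type keys in first-seen order and then builds each group with a separate filter pass per key.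
import Mathlib
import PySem

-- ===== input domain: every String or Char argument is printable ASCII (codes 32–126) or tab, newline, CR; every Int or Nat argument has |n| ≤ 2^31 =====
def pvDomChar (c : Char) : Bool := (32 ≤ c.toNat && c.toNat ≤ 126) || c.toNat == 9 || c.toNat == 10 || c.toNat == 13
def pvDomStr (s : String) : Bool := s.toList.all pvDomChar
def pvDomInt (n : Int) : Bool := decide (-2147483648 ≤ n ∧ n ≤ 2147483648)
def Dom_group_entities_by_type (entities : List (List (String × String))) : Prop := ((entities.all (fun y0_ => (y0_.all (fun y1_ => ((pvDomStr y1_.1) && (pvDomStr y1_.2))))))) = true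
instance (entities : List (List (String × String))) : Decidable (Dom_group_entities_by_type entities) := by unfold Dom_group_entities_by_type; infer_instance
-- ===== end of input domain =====

-- B replaces A's incremental dict-of-lists fold by a two-pass form: dedup the type
-- keys in first-seen order, then build each group with one filter pass per key
-- (objective: alternative, same result including key and group order).

-- shared key extraction: entity.get("entity_id",""); prefix before "." if "." in it, else "unknown"
def pvKeyOf (entity : List (String × String)) : String :=
  let eid := (PySem.Dict.mk entity).getD "entity_id" ""
  if PySem.Str.isIn "." eid then ((PySem.Str.split? eid ".").getD []).headI else "unknown"

-- ===== PORT A =====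
def group_entities_by_type (entities : List (List (String × String))) : List (String × List (List (String × String))) :=
  (entities.foldl (fun grouped entity =>
      let t := pvKeyOf entity
      let grouped := if grouped.contains t then grouped else grouped.insert t []
      grouped.insert t (grouped.getD t [] ++ [entity]))
    PySem.Dict.empty).items

-- ===== PORT B =====
def group_entities_by_type_alt (entities : List (List (String × String))) : List (String × List (List (String × String))) :=
  let keys := PySem.List.dedup (entities.map pvKeyOf)
  keys.map (fun k => (k, entities.filter (fun e => pvKeyOf e == k)))

-- ===== PRECONDITION & SPEC =====
def Spec_group_entities_by_type (entities : List (List (String × String))) (out : List (String × List (List (String × String)))) : Prop := out = group_entities_by_type_alt entities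
instance (entities : List (List (String × String))) (out : List (String × List (List (String × String)))) : Decidable (Spec_group_entities_by_type entities out) := by unfold Spec_group_entities_by_type; infer_instance

-- ===== CLAIM (what is proved, stated in full; the proofs are below) =====
def Claim_equal_group_entities_by_type : Prop := ∀ (entities : List (List (String × String))), Dom_group_entities_by_type entities → Spec_group_entities_by_type entities (group_entities_by_type entities)

-- ===== LEMMAS AND PROOFS =====

-- A's loop body, named for the invariant lemma
def pvStep (grouped : PySem.Dict String (List (List (String × String)))) (entity : List (String × String)) : PySem.Dict String (List (List (String × String))) :=
  let t := pvKeyOf entity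
  let grouped := if grouped.contains t then grouped else grouped.insert t []
  grouped.insert t (grouped.getD t [] ++ [entity])

-- invariant: items of the fold = old groups extended by matching entities, then the new keys' groups
lemma pvFold_items (l : List (List (String × String))) :
    ∀ (d : PySem.Dict String (List (List (String × String)))), d.keys.Nodup →
    (l.foldl pvStep d).items =
      d.items.map (fun p => (p.1, p.2 ++ l.filter (fun e => pvKeyOf e == p.1)))
      ++ ((PySem.Set.ofList (l.map pvKeyOf)).filter (fun k => !(d.contains k))).map
          (fun k => (k, l.filter (fun e => pvKeyOf e == k))) := by
  induction l with
  | nil => intro d h; simp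
  | cons e rest ih =>
    intro d h
    rw [List.foldl_cons]
    rw [List.map_cons, PySem.Set.ofList_cons]
    by_cases hc : d.contains (pvKeyOf e) = true
    · have hstep : pvStep d e = d.insert (pvKeyOf e) (d.getD (pvKeyOf e) [] ++ [e]) := by
        simp [pvStep, hc]
      rw [hstep, ih _ (PySem.Dict.nodup_keys_insert d _ _ h)]
      rw [PySem.Dict.items_insert_of_contains d _ hc, List.map_map]
      congr 1
      · apply List.map_congr_left
        intro p hp
        by_cases hpt : p.1 = pvKeyOf e
        · have hg : d.getD (pvKeyOf e) [] = p.2 := by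
            have := PySem.Dict.get?_of_mem_items d (k := pvKeyOf e) (v := p.2)
              (by rw [← hpt]; simpa using hp) h
            simp [PySem.Dict.getD_eq_get?_getD, this]
          simp [hpt, hg, Function.comp]
        · simp [hpt, Function.comp, Ne.symm hpt]
      · rw [List.filter_cons_of_neg (by simp [hc])]
        have hpred : ∀ k ∈ PySem.Set.ofList (rest.map pvKeyOf),
            (!(d.insert (pvKeyOf e) (d.getD (pvKeyOf e) [] ++ [e])).contains k)
              = (!(k == pvKeyOf e) && !(d.contains k)) := by
          intro k _
          rw [PySem.Dict.contains_insert]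
          by_cases hk : k = pvKeyOf e <;> simp [hk, hc]
        rw [List.filter_congr hpred]
        simp only [PySem.Set.discard, List.filter_filter]
        rw [List.filter_congr (fun k _ => by rw [Bool.and_comm])]
        apply List.map_congr_left
        intro k hk
        have hkt : ¬ (pvKeyOf e == k) = true := by
          rcases List.mem_filter.mp hk with ⟨-, hp⟩
          simp at hp
          simp [beq_iff_eq]
          exact fun h' => hp.2 h'.symm
        simp only [List.filter_cons]
        rw [if_neg hkt]
    · have hnc : d.contains (pvKeyOf e) = false := by simpa using hc
      have h1 : (d.insert (pvKeyOf e) ([] : List (List (String × String)))).contains (pvKeyOf e) = true := by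
        rw [PySem.Dict.contains_insert]; simp
      have hstep : (pvStep d e).items = d.items ++ [(pvKeyOf e, [e])] := by
        simp only [pvStep, hnc, Bool.false_eq_true, if_false]
        rw [PySem.Dict.items_insert_of_contains _ _ h1,
            PySem.Dict.items_insert_of_not_contains _ _ hnc]
        have hkeys : ∀ p ∈ d.items, (p.1 == pvKeyOf e) = false := by
          intro p hp
          cases hx : (p.1 == pvKeyOf e) with
          | false => rfl
          | true =>
            have hcx : d.contains (pvKeyOf e) = true := by
              simp only [PySem.Dict.contains, List.any_eq_true]
              exact ⟨p, hp, hx⟩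
            rw [hnc] at hcx; cases hcx
        rw [List.map_append, List.map_congr_left (fun p hp => by rw [if_neg (by simp [hkeys p hp])])]

        have hg : (d.insert (pvKeyOf e) ([] : List (List (String × String)))).getD (pvKeyOf e) [] = [] := by
          rw [PySem.Dict.getD_eq_get?_getD]
          have : (d.insert (pvKeyOf e) ([] : List (List (String × String)))).get? (pvKeyOf e) = some [] := by
            have := PySem.Dict.get?_of_mem_items (d.insert (pvKeyOf e) ([] : List (List (String × String))))
              (k := pvKeyOf e) (v := [])
              (by rw [PySem.Dict.items_insert_of_not_contains _ _ hnc]; simp)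
              (PySem.Dict.nodup_keys_insert d _ _ h)
            exact this
          simp [this]
        simp [hg]
      have hnodup : (pvStep d e).keys.Nodup := by
        simp only [pvStep, hnc, Bool.false_eq_true, if_false]
        exact PySem.Dict.nodup_keys_insert _ _ _ (PySem.Dict.nodup_keys_insert d _ _ h)
      rw [ih _ hnodup, hstep]
      rw [List.filter_cons_of_pos (by simp [hnc])]
      have hcont : ∀ k, (pvStep d e).contains k = ((k == pvKeyOf e) || d.contains k) := by
        intro k
        simp only [pvStep, hnc, Bool.false_eq_true, if_false]
        rw [PySem.Dict.contains_insert, PySem.Dict.contains_insert]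
        cases hk : (k == pvKeyOf e) <;> simp
      have hpred : ∀ k ∈ PySem.Set.ofList (rest.map pvKeyOf),
          (!(pvStep d e).contains k) = (!(k == pvKeyOf e) && !(d.contains k)) := by
        intro k _
        rw [hcont k]
        cases hk : (k == pvKeyOf e) <;> simp
      rw [List.filter_congr hpred]
      simp only [PySem.Set.discard, List.filter_filter]
      rw [List.map_append]
      have hfilter_e : rest.filter (fun x => pvKeyOf x == pvKeyOf e) = List.filter (fun x => pvKeyOf x == pvKeyOf e) rest := rfl
      have heq1 : d.items.map (fun p => (p.1, p.2 ++ rest.filter (fun x => pvKeyOf x == p.1)))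
          = d.items.map (fun p => (p.1, p.2 ++ (e :: rest).filter (fun x => pvKeyOf x == p.1))) := by
        apply List.map_congr_left
        intro p hp
        have hne : (pvKeyOf e == p.1) = false := by
          cases hx : (p.1 == pvKeyOf e) with
          | false => simp at hx ⊢; exact fun h' => hx h'.symm
          | true =>
            have hcx : d.contains (pvKeyOf e) = true := by
              simp only [PySem.Dict.contains, List.any_eq_true]
              exact ⟨p, hp, hx⟩
            rw [hnc] at hcx; cases hcx
        rw [List.filter_cons_of_neg (by simp [hne])]
      rw [heq1]
      rw [List.append_assoc]
      congr 1
      simp only [List.map_cons, List.map_nil, List.singleton_append]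
      congr 1
      · simp
      rw [List.filter_congr (fun k _ => by rw [Bool.and_comm])]
      apply List.map_congr_left
      intro k hk
      have hkt : ¬ (pvKeyOf e == k) = true := by
        rcases List.mem_filter.mp hk with ⟨-, hp⟩
        simp at hp
        simp [beq_iff_eq]
        exact fun h' => hp.2 h'.symm
      simp only [List.filter_cons]
      rw [if_neg hkt]

-- ===== VERDICT (by name: the statement is the Claim_ definition above) =====
theorem group_entities_by_type_spec : Claim_equal_group_entities_by_type := by
  intro entities _
  show _ = _
  unfold group_entities_by_type group_entities_by_type_alt
  have h := pvFold_items entities PySem.Dict.empty (by simp [PySem.Dict.keys, PySem.Dict.empty])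
  simpa [pvStep, PySem.List.dedup_eq_ofList, PySem.Dict.empty, PySem.Dict.contains,
    PySem.Dict.items] using h
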